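-- pv_equiv track=rewrite | github.com/masterfuzz/advent2022 | 2023/advent/day03.py | get_num_positions
-- ===== SOURCE A (Python) =====
-- def get_num_positions(grid):
--     nums = []
--     for x, row in enumerate(grid):
--         cur = None
--         for y, c in enumerate(row):
--             if ord(c) in range(48,58):
--                 if cur:
--                     cur.append([x,y])
--                     continue
--                 cur = [[x,y]]
--                 continue
--
--             if not cur:
--                 continue
--
--             nums.append(cur)
--             cur = None
--             continue
--         if cur:
--             nums.append(cur)
--     return nums
-- ===== SOURCE B (Python) =====
-- def get_num_positions(grid):
--     nums = []
--     for x, row in enumerate(grid):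
--         n = len(row)
--         y = 0
--         while y < n:
--             if '0' <= row[y] <= '9':
--                 start = y
--                 while y < n and '0' <= row[y] <= '9':
--                     y += 1
--                 nums.append([[x, j] for j in range(start, y)])
--             else:
--                 y += 1
--     return nums
-- ===== Notes on version B (the rewrite author's own statement) =====
-- stated objective: simpler
-- what changed: Replaces A's per-character cur-accumulator with an end-of-row flush by per-row run detection: an index loop that consumes each digit run at once and emits it as a range comprehension, with no pending state to flush.
import Mathlib
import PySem

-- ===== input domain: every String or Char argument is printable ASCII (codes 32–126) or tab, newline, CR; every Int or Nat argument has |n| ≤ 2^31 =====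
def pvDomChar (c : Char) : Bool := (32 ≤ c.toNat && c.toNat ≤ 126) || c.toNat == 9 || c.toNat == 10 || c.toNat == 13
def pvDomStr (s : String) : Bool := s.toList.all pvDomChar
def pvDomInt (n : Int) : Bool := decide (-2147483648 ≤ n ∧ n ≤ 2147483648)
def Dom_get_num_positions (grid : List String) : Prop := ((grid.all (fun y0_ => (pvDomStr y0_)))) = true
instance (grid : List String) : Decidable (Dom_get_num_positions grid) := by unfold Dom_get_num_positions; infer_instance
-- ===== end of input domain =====

-- B replaces A's per-character `cur` accumulator and end-of-row flush by per-row run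
-- detection: an index loop that consumes each digit run at once (objective: simpler).

-- ===== PORT A =====
-- Python truthiness of `cur` (None or a list): false for None and for []
def pvTruthy (cur : Option (List (List Int))) : Bool :=
  match cur with
  | none => false
  | some l => !l.isEmpty

-- one step of A's inner loop; state = (nums, cur)
def pvAStep (x : Int) (s : List (List (List Int)) × Option (List (List Int)))
    (p : Int × Char) : List (List (List Int)) × Option (List (List Int)) :=
  let nums := s.1
  let cur := s.2
  let y := p.1
  let c := p.2
  if 48 ≤ (c.toNat : Int) ∧ (c.toNat : Int) < 58 then  -- ord(c) in range(48,58)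
    if pvTruthy cur then (nums, some (cur.getD [] ++ [[x, y]]))
    else (nums, some [[x, y]])
  else
    if !pvTruthy cur then (nums, cur)
    else (nums ++ [cur.getD []], none)

-- end-of-row flush: `if cur: nums.append(cur)`
def pvAFinish (s : List (List (List Int)) × Option (List (List Int))) : List (List (List Int)) :=
  if pvTruthy s.2 then s.1 ++ [s.2.getD []] else s.1

def get_num_positions (grid : List String) : List (List (List Int)) :=
  (PySem.List.enumerate grid 0).foldl
    (fun nums p => pvAFinish ((PySem.List.enumerate p.2.toList 0).foldl (pvAStep p.1) (nums, none)))
    []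

-- ===== PORT B =====
def pvIsDig (c : Char) : Bool := decide ('0' ≤ c) && decide (c ≤ '9')   -- '0' <= c <= '9'

-- B's while loop over a row: consume a whole digit run at once (the inner
-- `while y < n and ...: y += 1` is the takeWhile/dropWhile split), emit
-- [[x, j] for j in range(start, y)], else advance by one.
def pvBScan (x : Int) (y : Int) (cs : List Char) : List (List (List Int)) :=
  match cs with
  | [] => []
  | c :: rest =>
    if pvIsDig c then
      let k : Int := (rest.takeWhile pvIsDig).length + 1
      ((PySem.List.pyRange y (y + k) 1).map (fun j => [x, j])) ::
        pvBScan x (y + k) (rest.dropWhile pvIsDig)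
    else
      pvBScan x (y + 1) rest
termination_by cs.length
decreasing_by
  · simpa using Nat.lt_succ_of_le (List.length_dropWhile_le pvIsDig rest)
  · simp

def get_num_positions_alt (grid : List String) : List (List (List Int)) :=
  ((PySem.List.enumerate grid 0).map (fun p => pvBScan p.1 0 p.2.toList)).flatten

-- ===== PRECONDITION & SPEC =====
def Spec_get_num_positions (grid : List String) (out : List (List (List Int))) : Prop := out = get_num_positions_alt grid
instance (grid : List String) (out : List (List (List Int))) : Decidable (Spec_get_num_positions grid out) := by unfold Spec_get_num_positions; infer_instance

-- ===== CLAIM (what is proved, stated in full; the proofs are below) =====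
def Claim_equal_get_num_positions : Prop := ∀ (grid : List String), Dom_get_num_positions grid → Spec_get_num_positions grid (get_num_positions grid)

-- ===== LEMMAS AND PROOFS =====

-- the two digit tests agree
lemma pvIsDig_iff (c : Char) : pvIsDig c = true ↔ (48 ≤ (c.toNat : Int) ∧ (c.toNat : Int) < 58) := by
  have h0 : ('0' : Char).val.toNat = 48 := by decide
  have h9 : ('9' : Char).val.toNat = 57 := by decide
  simp only [pvIsDig, Bool.and_eq_true, decide_eq_true_eq, Char.le_def,
    UInt32.le_iff_toNat_le, h0, h9, Char.toNat]
  omega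

-- joint row invariant: running A's inner loop (plus flush) from state (nums, none)
-- yields nums ++ pvBScan, and from (nums, some l) (l ≠ []) the pending run l is
-- extended by the leading digit run and then B takes over.
lemma pvRow (x : Int) : ∀ (cs : List Char),
    (∀ (y : Int) (nums : List (List (List Int))),
      pvAFinish ((PySem.List.enumerate cs y).foldl (pvAStep x) (nums, none))
        = nums ++ pvBScan x y cs)
    ∧ (∀ (y : Int) (nums : List (List (List Int))) (l : List (List Int)), l ≠ [] →
      pvAFinish ((PySem.List.enumerate cs y).foldl (pvAStep x) (nums, some l))
        = nums ++ ((l ++ (PySem.List.pyRange y (y + (cs.takeWhile pvIsDig).length) 1).map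
              (fun j => [x, j]))
            :: pvBScan x (y + (cs.takeWhile pvIsDig).length) (cs.dropWhile pvIsDig))) := by
  intro cs
  induction cs with
  | nil =>
    refine ⟨fun y nums => ?_, fun y nums l hl => ?_⟩
    · simp [PySem.List.enumerate, pvAFinish, pvTruthy, pvBScan]
    · simp [PySem.List.enumerate, pvAFinish, pvTruthy, pvBScan,
        List.isEmpty_eq_false_iff.mpr hl, PySem.List.pyRange_one_eq_nil (le_refl y)]
  | cons c rest ih =>
    by_cases hd : pvIsDig c = true
    · have hdi : 48 ≤ (c.toNat : Int) ∧ (c.toNat : Int) < 58 := (pvIsDig_iff c).mp hd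
      refine ⟨fun y nums => ?_, fun y nums l hl => ?_⟩
      · rw [PySem.List.enumerate_cons, List.foldl_cons]
        show pvAFinish ((PySem.List.enumerate rest (y+1)).foldl (pvAStep x)
          (pvAStep x (nums, none) (y, c))) = _
        rw [show pvAStep x (nums, none) (y, c) = (nums, some [[x, y]]) by
          simp [pvAStep, pvTruthy]; omega]
        rw [ih.2 (y+1) nums [[x, y]] (by simp)]
        rw [pvBScan, if_pos hd]
        have hcons : PySem.List.pyRange y (y + (((rest.takeWhile pvIsDig).length : Int) + 1)) 1
            = y :: PySem.List.pyRange (y+1) (y + (((rest.takeWhile pvIsDig).length : Int) + 1)) 1 := by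
          refine PySem.List.pyRange_one_cons ?_
          have : (0:Int) ≤ ((rest.takeWhile pvIsDig).length : Int) := by positivity
          omega
        rw [show y + 1 + ((rest.takeWhile pvIsDig).length : Int)
            = y + (((rest.takeWhile pvIsDig).length : Int) + 1) by ring] at *
        simp [hcons]
      · rw [PySem.List.enumerate_cons, List.foldl_cons]
        show pvAFinish ((PySem.List.enumerate rest (y+1)).foldl (pvAStep x)
          (pvAStep x (nums, some l) (y, c))) = _
        rw [show pvAStep x (nums, some l) (y, c) = (nums, some (l ++ [[x, y]])) by
          simp [pvAStep, pvTruthy, List.isEmpty_eq_false_iff.mpr hl]; omega]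
        rw [ih.2 (y+1) nums (l ++ [[x, y]]) (by simp)]
        rw [List.takeWhile_cons_of_pos hd, List.dropWhile_cons_of_pos hd]
        have hcons : PySem.List.pyRange y (y + (((rest.takeWhile pvIsDig).length : Int) + 1)) 1
            = y :: PySem.List.pyRange (y+1) (y + (((rest.takeWhile pvIsDig).length : Int) + 1)) 1 := by
          refine PySem.List.pyRange_one_cons ?_
          have : (0:Int) ≤ ((rest.takeWhile pvIsDig).length : Int) := by positivity
          omega
        rw [show y + 1 + ((rest.takeWhile pvIsDig).length : Int)
            = y + (((rest.takeWhile pvIsDig).length : Int) + 1) by ring] at *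
        simp [hcons]
    · have hdi : ¬ (48 ≤ (c.toNat : Int) ∧ (c.toNat : Int) < 58) := fun h => hd ((pvIsDig_iff c).mpr h)
      refine ⟨fun y nums => ?_, fun y nums l hl => ?_⟩
      · rw [PySem.List.enumerate_cons, List.foldl_cons]
        show pvAFinish ((PySem.List.enumerate rest (y+1)).foldl (pvAStep x)
          (pvAStep x (nums, none) (y, c))) = _
        rw [show pvAStep x (nums, none) (y, c) = (nums, none) by
          simp [pvAStep, pvTruthy]; omega]
        rw [ih.1 (y+1) nums, pvBScan, if_neg hd]
      · rw [PySem.List.enumerate_cons, List.foldl_cons]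
        show pvAFinish ((PySem.List.enumerate rest (y+1)).foldl (pvAStep x)
          (pvAStep x (nums, some l) (y, c))) = _
        rw [show pvAStep x (nums, some l) (y, c) = (nums ++ [l], none) by
          simp [pvAStep, pvTruthy, List.isEmpty_eq_false_iff.mpr hl]; omega]
        rw [ih.1 (y+1) (nums ++ [l])]
        rw [List.takeWhile_cons_of_neg hd, List.dropWhile_cons_of_neg hd]
        rw [pvBScan, if_neg hd]
        simp [PySem.List.pyRange_one_eq_nil (le_refl y)]

theorem get_num_positions_spec : Claim_equal_get_num_positions := by
  intro grid _
  unfold Spec_get_num_positions get_num_positions get_num_positions_alt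
  rw [PySem.List.foldl_congr_mem
    (g := fun nums p => nums ++ pvBScan p.1 0 p.2.toList)
    (h := fun acc p _ => (pvRow p.1 p.2.toList).1 0 acc)]
  rw [PySem.List.foldl_append_eq_flatMap]
  simp [List.flatMap_def]
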